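-- pv_equiv track=rewrite | github.com/ruihangzhang97/dynamic-ct-flow-rate-analysis | developing_sections/test_polarfiller.py | cutoffdecider
-- ===== SOURCE A (Python) =====
-- def longest_chain(jumps):
--
--     one = 0
--     two = 0
--     length = 0
--     longest_length = 0
--     lone = 0
--     ltwo = 0
--     for i in range(len(jumps)):
--         if jumps[i] == 0:
--             length += 1
--             two = i
--         if jumps[i] == 1:
--             length = 0
--             one = i+1
--             two = i+1
--         if length > longest_length:
--             lone = one
--             ltwo = two
--             longest_length = length
--     return lone, ltwo
--
-- def cutoffdecider(distss):
--
--     dists = []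
--     for dist in distss:
--         dists.append(dist)
--     dists.sort()
--     # plainplot(dists)
--
--     # the first jump of more than 5 pixels is the cutoff?
--     jumps = []
--     for i in range(len(dists)-1):
--         value = dists[i+1]-dists[i]
--         if value > 3:
--             jumps.append(1)
--         else:
--             jumps.append(0)
--     # plainplot(jumps)
--
--     # keep track of the longest set of small jumps
--     one, two = longest_chain(jumps)
--
--     front1 = dists[one]
--     back1 = dists[one+1]
--     front2 = dists[two]
--     back2 = dists[two+1]
--
--     small = round((back1+front1)/2)
--     big = round((back2+front2)/2)
--
--     return small, big
-- ===== SOURCE B (Python) =====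
-- # B: one pass over the sorted copy, no jumps list, no helper; simpler decomposition.
-- def cutoffdecider(distss):
--     dists = sorted(distss)
--     best_one = 0
--     best_two = 0
--     best_len = 0
--     cur_start = 0
--     cur_len = 0
--     for i in range(1, len(dists)):
--         if dists[i] - dists[i - 1] > 3:
--             cur_len = 0
--             cur_start = i
--         else:
--             cur_len += 1
--             if cur_len > best_len:
--                 best_len = cur_len
--                 best_one = cur_start
--                 best_two = i - 1
--     small = round((dists[best_one] + dists[best_one + 1]) / 2)
--     big = round((dists[best_two] + dists[best_two + 1]) / 2)
--     return small, big
-- ===== Notes on version B (the rewrite author's own statement) =====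
-- stated objective: simpler
-- what changed: B drops the intermediate jumps list and the longest_chain helper: a single pass over the sorted copy treats each gap > 3 as a chain break, tracking the current run start/length and the best run directly.
-- outside the precondition, e.g. on cutoffdecider([7]): A raises IndexError, B raises IndexError
import Mathlib
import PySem

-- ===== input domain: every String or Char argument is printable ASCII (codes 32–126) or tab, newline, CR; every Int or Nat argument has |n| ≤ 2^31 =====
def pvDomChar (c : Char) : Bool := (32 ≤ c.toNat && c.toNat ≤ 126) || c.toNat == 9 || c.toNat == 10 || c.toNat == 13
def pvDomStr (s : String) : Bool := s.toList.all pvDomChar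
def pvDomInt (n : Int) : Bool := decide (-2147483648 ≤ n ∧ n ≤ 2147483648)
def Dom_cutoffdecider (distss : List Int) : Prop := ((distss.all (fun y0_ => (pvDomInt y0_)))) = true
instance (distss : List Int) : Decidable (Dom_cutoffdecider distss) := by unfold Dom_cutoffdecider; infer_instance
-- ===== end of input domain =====

-- B folds once over the sorted list (gap > 3 = chain break) instead of building a jumps
-- list and scanning it with a helper; simpler decomposition, same return value on Pre_.


-- ===== PORT A =====
-- exact integer form of Python's round((a+b)/2): the sum halved, ties to the even
-- neighbour (banker's rounding); shared helper, both sources contain this expression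
def pyRound2 (s : Int) : Int :=
  let t := PySem.Int.floordiv s 2
  if PySem.Int.mod s 2 = 0 then t
  else if PySem.Int.mod t 2 = 0 then t else t + 1

-- loop body of longest_chain; state (one, two, length, longest_length, lone, ltwo)
def lcStep (jumps : List Int) (s : Int × Int × Int × Int × Int × Int) (i : Int) :
    Int × Int × Int × Int × Int × Int :=
  match s with
  | (one, two, length, longest, lone, ltwo) =>
    let length := if PySem.List.pyGetD jumps i 0 = 0 then length + 1 else length
    let two := if PySem.List.pyGetD jumps i 0 = 0 then i else two
    let length2 := if PySem.List.pyGetD jumps i 0 = 1 then 0 else length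
    let one := if PySem.List.pyGetD jumps i 0 = 1 then i + 1 else one
    let two := if PySem.List.pyGetD jumps i 0 = 1 then i + 1 else two
    if length2 > longest then (one, two, length2, length2, one, two)
    else (one, two, length2, longest, lone, ltwo)

def longestChain (jumps : List Int) : Int × Int :=
  let s := (PySem.List.pyRange 0 (jumps.length : Int)).foldl (lcStep jumps) (0, 0, 0, 0, 0, 0)
  (s.2.2.2.2.1, s.2.2.2.2.2)

-- body of cutoffdecider after the copy has been sorted (dists = the sorted copy)
def aCore (dists : List Int) : Int × Int :=
  let jumps := (PySem.List.pyRange 0 ((dists.length : Int) - 1)).foldl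
    (fun js i =>
      if PySem.List.pyGetD dists (i + 1) 0 - PySem.List.pyGetD dists i 0 > 3 then js ++ [(1 : Int)]
      else js ++ [(0 : Int)]) ([] : List Int)
  let ot := longestChain jumps
  let front1 := PySem.List.pyGetD dists ot.1 0
  let back1 := PySem.List.pyGetD dists (ot.1 + 1) 0
  let front2 := PySem.List.pyGetD dists ot.2 0
  let back2 := PySem.List.pyGetD dists (ot.2 + 1) 0
  (pyRound2 (back1 + front1), pyRound2 (back2 + front2))

def cutoffdecider (distss : List Int) : Int × Int :=
  let dists := distss.foldl (fun acc dist => acc ++ [dist]) ([] : List Int)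
  aCore (PySem.List.sorted dists (fun x => x) false)

-- ===== PORT B =====
-- loop body of B; state (best_one, best_two, best_len, cur_start, cur_len)
def bStep (dists : List Int) (s : Int × Int × Int × Int × Int) (i : Int) :
    Int × Int × Int × Int × Int :=
  match s with
  | (bestOne, bestTwo, bestLen, curStart, curLen) =>
    if PySem.List.pyGetD dists i 0 - PySem.List.pyGetD dists (i - 1) 0 > 3 then
      (bestOne, bestTwo, bestLen, i, 0)
    else
      let curLen := curLen + 1
      if curLen > bestLen then (curStart, i - 1, curLen, curStart, curLen)
      else (bestOne, bestTwo, bestLen, curStart, curLen)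

def bCore (dists : List Int) : Int × Int :=
  let t := (PySem.List.pyRange 1 (dists.length : Int)).foldl (bStep dists) (0, 0, 0, 0, 0)
  (pyRound2 (PySem.List.pyGetD dists t.1 0 + PySem.List.pyGetD dists (t.1 + 1) 0),
   pyRound2 (PySem.List.pyGetD dists t.2.1 0 + PySem.List.pyGetD dists (t.2.1 + 1) 0))

def cutoffdecider_alt (distss : List Int) : Int × Int :=
  bCore (PySem.List.sorted distss (fun x => x) false)

-- ===== PRECONDITION & SPEC =====
-- A raises IndexError (dists[0] or dists[1]) on lists of fewer than two elements.
def Pre_cutoffdecider (distss : List Int) : Prop := 2 ≤ distss.length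
instance (distss : List Int) : Decidable (Pre_cutoffdecider distss) := by
  unfold Pre_cutoffdecider; infer_instance
def pvWitness_cutoffdecider : List Int := [0, 1]

def Spec_cutoffdecider (distss : List Int) (out : Int × Int) : Prop := out = cutoffdecider_alt distss
instance (distss : List Int) (out : Int × Int) : Decidable (Spec_cutoffdecider distss out) := by unfold Spec_cutoffdecider; infer_instance

-- ===== CLAIM (what is proved, stated in full; the proofs are below) =====
def Claim_equal_cutoffdecider : Prop := ∀ (distss : List Int), Dom_cutoffdecider distss → Pre_cutoffdecider distss → Spec_cutoffdecider distss (cutoffdecider distss)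

-- ===== LEMMAS AND PROOFS =====

lemma pyRange_one_nil {a b : Int} (h : b ≤ a) : PySem.List.pyRange a b = [] := by
  apply List.eq_nil_iff_forall_not_mem.mpr
  intro x hx
  have := PySem.List.mem_pyRange_one.mp hx
  omega

-- the main loop invariant: from states related componentwise, A's recorded (lone, ltwo)
-- after the remaining jump indices equal B's (best_one, best_two)
lemma chain_eq (jumps d : List Int) (m : Nat)
    (hJ : ∀ j : Nat, j < m → PySem.List.pyGetD jumps (j : Int) 0 =
      if PySem.List.pyGetD d ((j : Int) + 1) 0 - PySem.List.pyGetD d (j : Int) 0 > 3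
      then (1 : Int) else 0) :
    ∀ (k j : Nat), j + k = m →
    ∀ (one two length longest lone ltwo : Int), 0 ≤ longest →
    (let s := (PySem.List.pyRange (j : Int) (m : Int)).foldl (lcStep jumps)
        (one, two, length, longest, lone, ltwo)
     let t := (PySem.List.pyRange ((j : Int) + 1) ((m : Int) + 1)).foldl (bStep d)
        (lone, ltwo, longest, one, length)
     (s.2.2.2.2.1, s.2.2.2.2.2) = (t.1, t.2.1)) := by
  intro k
  induction k with
  | zero =>
    intro j hj one two length longest lone ltwo hpos
    have h1 : PySem.List.pyRange (j : Int) (m : Int) = [] := pyRange_one_nil (by omega)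
    have h2 : PySem.List.pyRange ((j : Int) + 1) ((m : Int) + 1) = [] := pyRange_one_nil (by omega)
    simp only [h1, h2, List.foldl_nil]
  | succ k ih =>
    intro j hj one two length longest lone ltwo hpos
    have hjm : j < m := by omega
    have h1 : PySem.List.pyRange (j : Int) (m : Int) =
        (j : Int) :: PySem.List.pyRange ((j : Int) + 1) (m : Int) :=
      PySem.List.pyRange_one_cons (by omega)
    have h2 : PySem.List.pyRange ((j : Int) + 1) ((m : Int) + 1) =
        ((j : Int) + 1) :: PySem.List.pyRange (((j : Int) + 1) + 1) ((m : Int) + 1) :=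
      PySem.List.pyRange_one_cons (by omega)
    rw [h1, h2]
    simp only [List.foldl_cons]
    have hv := hJ j hjm
    have hone : ((j : Int) + 1) - 1 = (j : Int) := by ring
    have hstep1 : ((j : Int) + 1 : Int) = ((j + 1 : Nat) : Int) := by push_cast; ring
    by_cases hC : PySem.List.pyGetD d ((j : Int) + 1) 0 - PySem.List.pyGetD d (j : Int) 0 > 3
    · -- big jump: A resets via the jumps[i] == 1 branch, B starts a new chain at i
      have hv1 : PySem.List.pyGetD jumps (j : Int) 0 = 1 := by rw [hv, if_pos hC]
      have hA : lcStep jumps (one, two, length, longest, lone, ltwo) (j : Int) =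
          ((j : Int) + 1, (j : Int) + 1, 0, longest, lone, ltwo) := by
        simp only [lcStep, hv1]
        norm_num
        omega
      have hB : bStep d (lone, ltwo, longest, one, length) ((j : Int) + 1) =
          (lone, ltwo, longest, (j : Int) + 1, 0) := by
        simp only [bStep, hone]
        rw [if_pos hC]
      rw [hA, hB, hstep1]
      exact ih (j + 1) (by omega) _ _ 0 longest lone ltwo hpos
    · -- small gap: both extend the chain; both record iff length + 1 > longest
      have hv0 : PySem.List.pyGetD jumps (j : Int) 0 = 0 := by rw [hv, if_neg hC]
      by_cases hR : length + 1 > longest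
      · have hA : lcStep jumps (one, two, length, longest, lone, ltwo) (j : Int) =
            (one, (j : Int), length + 1, length + 1, one, (j : Int)) := by
          simp only [lcStep, hv0]
          norm_num
          intro hx
          exact absurd hx (by omega)
        have hB : bStep d (lone, ltwo, longest, one, length) ((j : Int) + 1) =
            (one, (j : Int), length + 1, one, length + 1) := by
          simp only [bStep, hone]
          rw [if_neg hC, if_pos hR]
        rw [hA, hB, hstep1]
        exact ih (j + 1) (by omega) one ((j : Int)) (length + 1) (length + 1) one ((j : Int))
          (by omega)
      · have hA : lcStep jumps (one, two, length, longest, lone, ltwo) (j : Int) =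
            (one, (j : Int), length + 1, longest, lone, ltwo) := by
          simp only [lcStep, hv0]
          norm_num
          intro hx
          exact absurd hx (by omega)
        have hB : bStep d (lone, ltwo, longest, one, length) ((j : Int) + 1) =
            (lone, ltwo, longest, one, length + 1) := by
          simp only [bStep, hone]
          rw [if_neg hC, if_neg hR]
        rw [hA, hB, hstep1]
        exact ih (j + 1) (by omega) one ((j : Int)) (length + 1) longest lone ltwo hpos

-- A's jumps list is the map of the gap indicator over the jump indices
lemma jumps_eq (d : List Int) :
    (PySem.List.pyRange 0 ((d.length : Int) - 1)).foldl
      (fun js i =>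
        if PySem.List.pyGetD d (i + 1) 0 - PySem.List.pyGetD d i 0 > 3 then js ++ [(1 : Int)]
        else js ++ [(0 : Int)]) ([] : List Int) =
    (PySem.List.pyRange 0 ((d.length : Int) - 1)).map
      (fun i => if PySem.List.pyGetD d (i + 1) 0 - PySem.List.pyGetD d i 0 > 3
                then (1 : Int) else 0) := by
  rw [PySem.List.foldl_congr_mem _ _
      (fun js i => js ++ [if PySem.List.pyGetD d (i + 1) 0 - PySem.List.pyGetD d i 0 > 3
                          then (1 : Int) else 0]) _
      (by intro acc x _; dsimp only; split_ifs <;> rfl)]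
  rw [PySem.List.foldl_append_singleton_eq_map]
  rfl

lemma core_eq (d : List Int) (h : 2 ≤ d.length) : aCore d = bCore d := by
  simp only [aCore, bCore]
  set m : Nat := d.length - 1 with hm
  have hm2 : ((d.length : Int) - 1) = (m : Int) := by omega
  have hn : ((m : Int) + 1) = (d.length : Int) := by omega
  rw [jumps_eq d, hm2]
  set jumps := (PySem.List.pyRange 0 (m : Int)).map
    (fun i => if PySem.List.pyGetD d (i + 1) 0 - PySem.List.pyGetD d i 0 > 3
              then (1 : Int) else 0) with hjumps
  have hJ : ∀ j : Nat, j < m → PySem.List.pyGetD jumps (j : Int) 0 =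
      if PySem.List.pyGetD d ((j : Int) + 1) 0 - PySem.List.pyGetD d (j : Int) 0 > 3
      then (1 : Int) else 0 := by
    intro j hjm
    rw [hjumps]
    exact PySem.List.pyGetD_map_pyRange _ m j 0 hjm
  have hjl : (jumps.length : Int) = (m : Int) := by
    rw [hjumps]
    simp [PySem.List.pyRange_zero_natCast]
  have hmain := chain_eq jumps d m hJ m 0 (by omega) 0 0 0 0 0 0 (le_refl 0)
  simp only [Nat.cast_zero, zero_add, hn] at hmain
  simp only [longestChain]
  rw [hjl]
  simp only [Prod.mk.injEq] at hmain
  obtain ⟨e1, e2⟩ := hmain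
  rw [e1, e2]
  simp only [Prod.mk.injEq]
  exact ⟨congrArg pyRound2 (by ring), congrArg pyRound2 (by ring)⟩

-- ===== VERDICT (by name: the statement is the Claim_ definition above) =====
theorem cutoffdecider_spec : Claim_equal_cutoffdecider := by
  intro distss _ hpre
  unfold Spec_cutoffdecider cutoffdecider cutoffdecider_alt
  rw [PySem.List.foldl_append_singleton distss []]
  rw [List.nil_append]
  exact core_eq _ (by rw [PySem.List.length_sorted]; exact hpre)
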